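-- pv_equiv track=rewrite | github.com/Shishir420-GIT/Python | Practice_Questions/count_words_in_sentance.py | myList
-- ===== SOURCE A (Python) =====
-- def myList(arr):
--     val = set()
--     result = []
--
--     for num in arr:
--         if num not in val:
--             val.add(num)
--             result.append(num)
--
--     for num in arr:
--         if arr.count(num) > 1 and num in val:
--             result.append(num)
--             val.remove(num)
--
--     return result
-- ===== SOURCE B (Python) =====
-- def myList(arr):
--     # Backward sweep: reoccurs[i] is True iff arr[i] appears again later in arr.
--     after = set()
--     reoccurs = []
--     for x in reversed(arr):
--         reoccurs.append(x in after)
--         after.add(x)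
--     reoccurs.reverse()
--     # Single forward pass emitting both lists at once (no rescans, no counting).
--     seen = set()
--     uniques = []
--     dups = []
--     for x, again in zip(arr, reoccurs):
--         if x not in seen:
--             seen.add(x)
--             uniques.append(x)
--             if again:
--                 dups.append(x)
--     return uniques + dups
-- ===== Notes on version B (the rewrite author's own statement) =====
-- stated objective: faster
-- what changed: B replaces A's two forward scans with arr.count and set-removal by a backward sweep computing a does-it-reoccur flag per position plus one forward pass that emits the unique list and the duplicate list simultaneously.
import Mathlib
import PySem

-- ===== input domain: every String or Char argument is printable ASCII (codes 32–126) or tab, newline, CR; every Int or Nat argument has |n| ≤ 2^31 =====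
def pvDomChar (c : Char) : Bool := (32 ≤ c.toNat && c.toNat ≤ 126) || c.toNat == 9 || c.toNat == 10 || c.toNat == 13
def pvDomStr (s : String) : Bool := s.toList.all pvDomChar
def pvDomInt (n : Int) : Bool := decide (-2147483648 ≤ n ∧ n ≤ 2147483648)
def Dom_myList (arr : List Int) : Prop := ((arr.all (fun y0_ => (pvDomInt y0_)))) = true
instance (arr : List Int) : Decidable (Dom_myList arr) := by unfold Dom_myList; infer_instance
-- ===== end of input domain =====

-- B replaces A's two forward scans (arr.count inside the second loop, set removal) by a
-- backward sweep computing per-position "reoccurs later" flags plus ONE forward pass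
-- emitting uniques and duplicates together: faster (asymptotic).

-- ===== PORT A =====
def myList (arr : List Int) : List Int :=
  let r1 := arr.foldl
    (fun (p : PySem.Set Int × List Int) num =>
      if ¬ (num ∈ p.1) then (PySem.Set.add p.1 num, p.2 ++ [num]) else p)
    ((PySem.Set.empty : PySem.Set Int), ([] : List Int))
  let r2 := arr.foldl
    (fun (p : PySem.Set Int × List Int) num =>
      if PySem.List.count arr num > 1 ∧ num ∈ p.1 then
        -- val.remove(num): the guard gives num ∈ val, so discard is exact here
        (PySem.Set.discard p.1 num, p.2 ++ [num])
      else p)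
    r1
  r2.2

-- ===== PORT B =====
def myList_alt (arr : List Int) : List Int :=
  -- backward sweep over reversed(arr): flag = (x in after), then after.add(x); reverse at the end
  let p := arr.reverse.foldl
    (fun (q : PySem.Set Int × List Bool) x =>
      (PySem.Set.add q.1 x, q.2 ++ [decide (x ∈ q.1)]))
    ((PySem.Set.empty : PySem.Set Int), ([] : List Bool))
  let reoccurs := p.2.reverse
  -- one forward pass over zip(arr, reoccurs) emitting uniques and dups together
  let r := (arr.zip reoccurs).foldl
    (fun (st : PySem.Set Int × List Int × List Int) xa =>
      if ¬ (xa.1 ∈ st.1) then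
        (PySem.Set.add st.1 xa.1, st.2.1 ++ [xa.1],
         if xa.2 then st.2.2 ++ [xa.1] else st.2.2)
      else st)
    ((PySem.Set.empty : PySem.Set Int), ([] : List Int), ([] : List Int))
  r.2.1 ++ r.2.2

-- ===== PRECONDITION & SPEC =====
def Spec_myList (arr : List Int) (out : List Int) : Prop := out = myList_alt arr
instance (arr : List Int) (out : List Int) : Decidable (Spec_myList arr out) := by unfold Spec_myList; infer_instance

-- ===== CLAIM (what is proved, stated in full; the proofs are below) =====
def Claim_equal_myList : Prop := ∀ (arr : List Int), Dom_myList arr → Spec_myList arr (myList arr)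

-- ===== LEMMAS AND PROOFS =====

-- appended elements of A's first loop, in recursion form
def pvD1 (s : PySem.Set Int) : List Int → List Int
  | [] => []
  | n :: l => if n ∈ s then pvD1 s l else n :: pvD1 (PySem.Set.add s n) l

-- appended elements of A's second loop, in recursion form
def pvApp (arr : List Int) (S : PySem.Set Int) : List Int → List Int
  | [] => []
  | n :: l =>
    if PySem.List.count arr n > 1 ∧ n ∈ S then n :: pvApp arr (PySem.Set.discard S n) l
    else pvApp arr S l

-- the per-position "reoccurs later" flags of B, in recursion form
def pvFlags : List Int → List Bool
  | [] => []
  | x :: t => decide (x ∈ t) :: pvFlags t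

-- duplicates emitted by B's forward pass, in recursion form
def pvDup (s : PySem.Set Int) : List Int → List Int
  | [] => []
  | x :: t =>
    if x ∈ s then pvDup s t
    else if x ∈ t then x :: pvDup (PySem.Set.add s x) t else pvDup (PySem.Set.add s x) t

lemma pv_filter_discard (u : List Int) (n : Int) (p : Int → Bool) (hp : p n = false) :
    (PySem.Set.discard u n).filter p = u.filter p := by
  rw [PySem.Set.discard, List.filter_filter]
  apply List.filter_congr
  intro x _
  by_cases hx : x = n
  · subst hx; simp [hp]
  · simp [hx]

lemma pv_foldl1 (l : List Int) (s : PySem.Set Int) (r : List Int) :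
    l.foldl
      (fun (p : PySem.Set Int × List Int) num =>
        if ¬ (num ∈ p.1) then (PySem.Set.add p.1 num, p.2 ++ [num]) else p)
      (s, r)
    = (PySem.Set.update s l, r ++ pvD1 s l) := by
  induction l generalizing s r with
  | nil => simp [PySem.Set.update, pvD1]
  | cons n l ih =>
    by_cases h : n ∈ s
    · rw [List.foldl_cons]
      rw [show (if ¬ (n ∈ (s, r).1) then (PySem.Set.add (s, r).1 n, (s, r).2 ++ [n]) else (s, r)) = (s, r)
          from if_neg (not_not_intro h)]
      rw [ih]
      simp [pvD1, h, PySem.Set.update]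
    · rw [List.foldl_cons]
      rw [show (if ¬ (n ∈ (s, r).1) then (PySem.Set.add (s, r).1 n, (s, r).2 ++ [n]) else (s, r))
            = (PySem.Set.add s n, r ++ [n]) from if_pos h]
      rw [ih]
      simp [pvD1, h, PySem.Set.update]

lemma pv_foldl2 (arr l : List Int) (S : PySem.Set Int) (r : List Int) :
    (l.foldl
      (fun (p : PySem.Set Int × List Int) num =>
        if PySem.List.count arr num > 1 ∧ num ∈ p.1 then
          (PySem.Set.discard p.1 num, p.2 ++ [num])
        else p)
      (S, r)).2
    = r ++ pvApp arr S l := by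
  induction l generalizing S r with
  | nil => simp [pvApp]
  | cons n l ih =>
    rw [List.foldl_cons]
    by_cases h : PySem.List.count arr n > 1 ∧ n ∈ S
    · rw [show (if PySem.List.count arr n > 1 ∧ n ∈ (S, r).1 then
            (PySem.Set.discard (S, r).1 n, (S, r).2 ++ [n]) else (S, r))
          = (PySem.Set.discard S n, r ++ [n]) from if_pos h]
      rw [ih]
      have e : pvApp arr S (n :: l) = n :: pvApp arr (PySem.Set.discard S n) l := by
        simp only [pvApp]; rw [if_pos h]
      rw [e]; simp
    · rw [show (if PySem.List.count arr n > 1 ∧ n ∈ (S, r).1 then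
            (PySem.Set.discard (S, r).1 n, (S, r).2 ++ [n]) else (S, r)) = (S, r) from if_neg h]
      rw [ih]
      have e : pvApp arr S (n :: l) = pvApp arr S l := by
        simp only [pvApp]; rw [if_neg h]
      rw [e]

lemma pv_d1_eq (l : List Int) (s : PySem.Set Int) :
    pvD1 s l = (PySem.Set.ofList l).filter (fun x => decide (x ∉ s)) := by
  induction l generalizing s with
  | nil => rfl
  | cons n l ih =>
    rw [PySem.Set.ofList_cons]
    by_cases h : n ∈ s
    · have e : pvD1 s (n :: l) = pvD1 s l := by simp only [pvD1]; rw [if_pos h]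
      have hpn : decide (n ∉ s) = false := by simp [h]
      rw [e, ih, List.filter_cons, hpn]
      simp only [Bool.false_eq_true, if_false]
      rw [pv_filter_discard _ _ _ hpn]
    · have e : pvD1 s (n :: l) = n :: pvD1 (PySem.Set.add s n) l := by
        simp only [pvD1]; rw [if_neg h]
      have hadd : PySem.Set.add s n = s ++ [n] := by
        simp [PySem.Set.add, PySem.Set.contains, h]
      have hpn : decide (n ∉ s) = true := by simp [h]
      rw [e, ih, hadd, List.filter_cons, hpn]
      simp only [if_true]
      congr 1
      rw [PySem.Set.discard, List.filter_filter]
      apply List.filter_congr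
      intro x _
      by_cases hxn : x = n
      · subst hxn; simp
      · simp [hxn]

lemma pv_app_eq (arr : List Int) (l : List Int) (S : PySem.Set Int) :
    pvApp arr S l
    = (PySem.Set.ofList l).filter
        (fun x => decide (x ∈ S ∧ PySem.List.count arr x > 1)) := by
  induction l generalizing S with
  | nil => rfl
  | cons n l ih =>
    rw [PySem.Set.ofList_cons]
    by_cases h : PySem.List.count arr n > 1 ∧ n ∈ S
    · have e : pvApp arr S (n :: l) = n :: pvApp arr (PySem.Set.discard S n) l := by
        simp only [pvApp]; rw [if_pos h]
      have hpn : decide (n ∈ S ∧ PySem.List.count arr n > 1) = true := by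
        simp only [decide_eq_true_eq]; exact ⟨h.2, h.1⟩
      rw [e, ih, List.filter_cons, hpn]
      simp only [if_true]
      congr 1
      rw [show (PySem.Set.ofList l).discard n
            = (PySem.Set.ofList l).filter (fun y => !y == n) from rfl,
          List.filter_filter]
      apply List.filter_congr
      intro x _
      by_cases hxn : x = n
      · subst hxn; simp [PySem.Set.mem_discard]
      · simp [PySem.Set.mem_discard, hxn]
    · have e : pvApp arr S (n :: l) = pvApp arr S l := by
        simp only [pvApp]; rw [if_neg h]
      have hpn : decide (n ∈ S ∧ PySem.List.count arr n > 1) = false := by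
        simp only [decide_eq_false_iff_not]
        intro hc
        exact h ⟨hc.2, hc.1⟩
      rw [e, ih, List.filter_cons, hpn]
      simp only [Bool.false_eq_true, if_false]
      rw [pv_filter_discard _ _ _ hpn]

-- B's backward sweep, expressed as a foldr, produces exactly pvFlags
lemma pv_back (l : List Int) :
    (l.foldr (fun x (q : PySem.Set Int × List Bool) =>
        (PySem.Set.add q.1 x, q.2 ++ [decide (x ∈ q.1)]))
      ((PySem.Set.empty : PySem.Set Int), ([] : List Bool))).2.reverse = pvFlags l
    ∧ ∀ y : Int,
        (y ∈ (l.foldr (fun x (q : PySem.Set Int × List Bool) =>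
          (PySem.Set.add q.1 x, q.2 ++ [decide (x ∈ q.1)]))
          ((PySem.Set.empty : PySem.Set Int), ([] : List Bool))).1) ↔ y ∈ l := by
  induction l with
  | nil => constructor
           · rfl
           · intro y; simp [PySem.Set.empty]
  | cons x t ih =>
    obtain ⟨h1, h2⟩ := ih
    constructor
    · rw [List.foldr_cons]
      simp only [List.reverse_append, List.reverse_cons, List.reverse_nil]
      rw [h1]
      simp only [pvFlags, List.nil_append, List.singleton_append]
      congr 1
      rw [decide_eq_decide]
      exact h2 x
    · intro y
      rw [List.foldr_cons]
      simp only [PySem.Set.mem_add, h2 y, List.mem_cons]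
      tauto

-- B's forward pass over zip(arr, pvFlags arr), characterised
lemma pv_zip (l : List Int) (s : PySem.Set Int) (u d : List Int) :
    (l.zip (pvFlags l)).foldl
      (fun (st : PySem.Set Int × List Int × List Int) xa =>
        if ¬ (xa.1 ∈ st.1) then
          (PySem.Set.add st.1 xa.1, st.2.1 ++ [xa.1],
           if xa.2 then st.2.2 ++ [xa.1] else st.2.2)
        else st)
      (s, u, d)
    = (PySem.Set.update s l, u ++ pvD1 s l, d ++ pvDup s l) := by
  induction l generalizing s u d with
  | nil => simp [pvFlags, PySem.Set.update, pvD1, pvDup]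
  | cons x t ih =>
    simp only [pvFlags, List.zip_cons_cons, List.foldl_cons]
    by_cases hx : x ∈ s
    · rw [show (if ¬ ((x, decide (x ∈ t)).1 ∈ (s, u, d).1) then
          (PySem.Set.add (s, u, d).1 (x, decide (x ∈ t)).1,
           (s, u, d).2.1 ++ [(x, decide (x ∈ t)).1],
           if (x, decide (x ∈ t)).2 then (s, u, d).2.2 ++ [(x, decide (x ∈ t)).1] else (s, u, d).2.2)
          else (s, u, d)) = (s, u, d) from if_neg (not_not_intro hx)]
      rw [ih]
      simp [pvD1, pvDup, hx, PySem.Set.update]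
    · rw [show (if ¬ ((x, decide (x ∈ t)).1 ∈ (s, u, d).1) then
          (PySem.Set.add (s, u, d).1 (x, decide (x ∈ t)).1,
           (s, u, d).2.1 ++ [(x, decide (x ∈ t)).1],
           if (x, decide (x ∈ t)).2 then (s, u, d).2.2 ++ [(x, decide (x ∈ t)).1] else (s, u, d).2.2)
          else (s, u, d))
          = (PySem.Set.add s x, u ++ [x], if decide (x ∈ t) then d ++ [x] else d)
          from if_pos hx]
      rw [ih]
      by_cases ht : x ∈ t
      · simp [pvD1, pvDup, hx, ht, PySem.Set.update]
      · simp [pvD1, pvDup, hx, ht, PySem.Set.update]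

-- elements emitted by the first-occurrence pass are not in the seen set
lemma pv_d1_not_mem (l : List Int) (s : PySem.Set Int) :
    ∀ y ∈ pvD1 s l, y ∉ s := by
  induction l generalizing s with
  | nil => intro y hy; cases hy
  | cons x t ih =>
    intro y hy
    by_cases hx : x ∈ s
    · rw [show pvD1 s (x :: t) = pvD1 s t from by simp only [pvD1]; rw [if_pos hx]] at hy
      exact ih s y hy
    · rw [show pvD1 s (x :: t) = x :: pvD1 (PySem.Set.add s x) t from by
        simp only [pvD1]; rw [if_neg hx]] at hy
      rcases List.mem_cons.mp hy with h | h
      · subst h; exact hx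
      · have := ih (PySem.Set.add s x) y h
        intro hys
        exact this ((PySem.Set.mem_add s x y).mpr (Or.inl hys))

-- B's duplicates are exactly the emitted uniques that occur more than once
lemma pv_dup_eq (l : List Int) (s : PySem.Set Int) :
    pvDup s l = (pvD1 s l).filter (fun x => decide (1 < List.count x l)) := by
  induction l generalizing s with
  | nil => rfl
  | cons x t ih =>
    by_cases hx : x ∈ s
    · rw [show pvDup s (x :: t) = pvDup s t from by simp only [pvDup]; rw [if_pos hx],
          show pvD1 s (x :: t) = pvD1 s t from by simp only [pvD1]; rw [if_pos hx], ih]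
      apply List.filter_congr
      intro y hy
      have hyx : y ≠ x := fun h => pv_d1_not_mem t s y hy (h ▸ hx)
      rw [decide_eq_decide, List.count_cons]
      simp only [beq_iff_eq, if_neg (fun h : x = y => hyx h.symm)]
      omega
    · rw [show pvDup s (x :: t)
            = if x ∈ t then x :: pvDup (PySem.Set.add s x) t else pvDup (PySem.Set.add s x) t
          from by simp only [pvDup]; rw [if_neg hx],
          show pvD1 s (x :: t) = x :: pvD1 (PySem.Set.add s x) t from by
            simp only [pvD1]; rw [if_neg hx]]
      have htl : (pvD1 (PySem.Set.add s x) t).filter (fun y => decide (1 < List.count y t))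
          = (pvD1 (PySem.Set.add s x) t).filter (fun y => decide (1 < List.count y (x :: t))) := by
        apply List.filter_congr
        intro y hy
        have hyx : y ≠ x := by
          intro h
          exact pv_d1_not_mem t (PySem.Set.add s x) y hy
            (h ▸ (PySem.Set.mem_add s x x).mpr (Or.inr rfl))
        rw [decide_eq_decide, List.count_cons]
        simp only [beq_iff_eq, if_neg (fun h : x = y => hyx h.symm)]
        omega
      rw [List.filter_cons]
      have hhd : (decide (1 < List.count x (x :: t))) = decide (x ∈ t) := by
        rw [decide_eq_decide, List.count_cons_self]
        constructor
        · intro h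
          have : 0 < List.count x t := by omega
          exact List.count_pos_iff.mp this
        · intro h
          have : 0 < List.count x t := List.count_pos_iff.mpr h
          omega
      rw [hhd]
      by_cases ht : x ∈ t
      · simp only [ht, decide_true, if_true]
        rw [ih, htl]
      · simp only [ht, decide_false, Bool.false_eq_true, if_false]
        rw [ih, htl]

-- ===== VERDICT (by name: the statement is the Claim_ definition above) =====
theorem myList_spec : Claim_equal_myList := by
  intro arr _
  show myList arr = myList_alt arr
  simp only [myList, myList_alt]
  rw [pv_foldl1, pv_foldl2, List.nil_append]
  simp only [List.foldl_reverse]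
  rw [(pv_back arr).1, pv_zip, List.nil_append, List.nil_append]
  rw [show PySem.Set.update (PySem.Set.empty : PySem.Set Int) arr = PySem.Set.ofList arr from rfl]
  have hD : pvD1 (PySem.Set.empty : PySem.Set Int) arr = PySem.Set.ofList arr := by
    rw [pv_d1_eq]
    apply List.filter_eq_self.mpr
    intro a _
    simp [PySem.Set.empty]
  rw [pv_app_eq, pv_dup_eq, hD]
  congr 1
  apply List.filter_congr
  intro x hx
  have hmem : x ∈ arr := (PySem.Set.mem_ofList arr x).mp hx
  have hc : PySem.List.count arr x = List.count x arr := rfl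
  rw [decide_eq_decide]
  constructor
  · intro h
    have := h.2
    rw [hc] at this
    exact_mod_cast this
  · intro h
    refine ⟨hx, ?_⟩
    rw [hc]
    exact_mod_cast h
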